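-- pv_equiv track=rewrite | github.com/gkuwanto/hypothesize | src/hypothesize/core/json_extract.py | _strip_trailing_commas
-- ===== SOURCE A (Python) =====
-- def _strip_trailing_commas(text: str) -> str:
--     """Remove commas that precede ``}`` or ``]`` outside of string literals.
--
--     Uses the same string-literal-aware scanning logic as ``_scan_balanced``
--     so that commas embedded inside string values are never touched.
--     """
--     result: list[str] = []
--     in_string = False
--     i = 0
--     n = len(text)
--
--     while i < n:
--         ch = text[i]
--         if in_string:
--             result.append(ch)
--             if ch == "\\" and i + 1 < n:
--                 result.append(text[i + 1])
--                 i += 2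
--                 continue
--             if ch == '"':
--                 in_string = False
--             i += 1
--             continue
--
--         if ch == '"':
--             in_string = True
--             result.append(ch)
--             i += 1
--             continue
--
--         if ch == ",":
--             j = i + 1
--             while j < n and text[j] in " \t\n\r":
--                 j += 1
--             if j < n and text[j] in "}]":
--                 # Skip this comma — it is a trailing comma before a
--                 # closer, which ``json.loads`` rejects.
--                 i += 1
--                 continue
--
--         result.append(ch)
--         i += 1
--
--     return "".join(result)
-- ===== SOURCE B (Python) =====
-- def _strip_trailing_commas(text: str) -> str:
--     # Pass 1: annotate every character with whether it lies inside a string literal.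
--     marked = []
--     in_string = False
--     i = 0
--     n = len(text)
--     while i < n:
--         ch = text[i]
--         if in_string:
--             if ch == "\\" and i + 1 < n:
--                 marked.append((ch, True))
--                 marked.append((text[i + 1], True))
--                 i += 2
--                 continue
--             marked.append((ch, True))
--             if ch == '"':
--                 in_string = False
--             i += 1
--         else:
--             marked.append((ch, False))
--             if ch == '"':
--                 in_string = True
--             i += 1
--     # Pass 2 (right to left): maintain a flag that records whether, looking
--     # rightwards past whitespace, a closing brace/bracket comes first; drop
--     # commas outside strings exactly when that flag holds.
--     out = []
--     before_closer = False
--     for ch, in_str in reversed(marked):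
--         if not (ch == "," and not in_str and before_closer):
--             out.append(ch)
--         if ch in "}]":
--             before_closer = True
--         elif ch not in " \t\n\r":
--             before_closer = False
--     return "".join(reversed(out))
-- ===== Notes on version B (the rewrite author's own statement) =====
-- stated objective: alternative
-- what changed: Replaced the per-comma forward whitespace-lookahead with a two-pass partition: a first pass marks which characters are inside string literals, and a second right-to-left pass keeps a single flag recording whether the next non-whitespace char to the right is a closer, so each comma is decided from that flag instead of rescanning the whitespace run ahead of it.
import Mathlib
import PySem

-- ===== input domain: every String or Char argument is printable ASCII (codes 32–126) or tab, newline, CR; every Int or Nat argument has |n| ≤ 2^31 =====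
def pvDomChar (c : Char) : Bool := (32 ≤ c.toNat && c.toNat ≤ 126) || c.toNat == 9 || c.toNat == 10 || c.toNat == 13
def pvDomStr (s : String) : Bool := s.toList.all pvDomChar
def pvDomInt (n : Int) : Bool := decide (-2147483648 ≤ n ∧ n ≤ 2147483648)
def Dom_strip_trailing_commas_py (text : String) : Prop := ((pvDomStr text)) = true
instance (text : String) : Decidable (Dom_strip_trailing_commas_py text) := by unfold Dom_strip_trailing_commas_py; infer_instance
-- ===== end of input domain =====

-- B replaces A's per-comma forward whitespace lookahead by a mark pass plus a
-- right-to-left flag pass (alternative decomposition; same return value).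

def pvWs (c : Char) : Bool := c == ' ' || c == '\t' || c == '\n' || c == '\r'
def pvCloser (c : Char) : Bool := c == '}' || c == ']'

-- ===== PORT A =====
-- the inner `while` of A: skip whitespace, then `j < n and text[j] in "}]"`
def pvCommaLook : List Char → Bool
  | [] => false
  | c :: r => if pvWs c then pvCommaLook r else pvCloser c

def pvLoopA : List Char → Bool → List Char
  | [], _ => []
  | ch :: rest, true =>
      if ch == '\\' then
        match rest with
        | c2 :: r2 => ch :: c2 :: pvLoopA r2 true
        | [] => ch :: pvLoopA [] (!(ch == '"'))
      else ch :: pvLoopA rest (!(ch == '"'))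
  | ch :: rest, false =>
      if ch == '"' then ch :: pvLoopA rest true
      else if ch == ',' && pvCommaLook rest then pvLoopA rest false
      else ch :: pvLoopA rest false

def strip_trailing_commas_py (text : String) : String :=
  String.mk (pvLoopA text.toList false)

-- ===== PORT B =====
-- pass 1 of Source B: each character paired with its in_string mark
def pvMarkB : List Char → Bool → List (Char × Bool)
  | [], _ => []
  | ch :: rest, true =>
      if ch == '\\' then
        match rest with
        | c2 :: r2 => (ch, true) :: (c2, true) :: pvMarkB r2 true
        | [] => (ch, true) :: pvMarkB [] (!(ch == '"'))
      else (ch, true) :: pvMarkB rest (!(ch == '"'))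
  | ch :: rest, false => (ch, false) :: pvMarkB rest (ch == '"')

def pvUpd (c : Char) (f : Bool) : Bool :=
  if pvCloser c then true else if pvWs c then f else false

-- pass 2 of Source B: walk the marked list reversed, prepending kept chars
def pvLoopB : List (Char × Bool) → Bool → List Char → List Char
  | [], _, acc => acc
  | (ch, s) :: rest, flag, acc =>
      pvLoopB rest (pvUpd ch flag)
        (if ch == ',' && !s && flag then acc else ch :: acc)

def strip_trailing_commas_py_alt (text : String) : String :=
  String.mk (pvLoopB ((pvMarkB text.toList false).reverse) false [])

-- ===== PRECONDITION & SPEC =====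
def Spec_strip_trailing_commas_py (text : String) (out : String) : Prop := out = strip_trailing_commas_py_alt text
instance (text : String) (out : String) : Decidable (Spec_strip_trailing_commas_py text out) := by unfold Spec_strip_trailing_commas_py; infer_instance

-- ===== CLAIM (what is proved, stated in full; the proofs are below) =====
def Claim_equal_strip_trailing_commas_py : Prop := ∀ (text : String), Dom_strip_trailing_commas_py text → Spec_strip_trailing_commas_py text (strip_trailing_commas_py text)

-- ===== LEMMAS AND PROOFS =====

theorem pvLoopB_append (M N : List (Char × Bool)) (f : Bool) (acc : List Char) :
    pvLoopB (M ++ N) f acc = pvLoopB N (M.foldl (fun g p => pvUpd p.1 g) f) (pvLoopB M f acc) := by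
  induction M generalizing f acc with
  | nil => simp [pvLoopB]
  | cons p M ih => cases p; simp [pvLoopB, ih]

theorem pvWs_not_closer (c : Char) (h : pvWs c = true) : pvCloser c = false := by
  unfold pvWs at h
  rcases Bool.or_eq_true_iff.1 h with h | h
  · rcases Bool.or_eq_true_iff.1 h with h | h
    · rcases Bool.or_eq_true_iff.1 h with h | h
      all_goals simp_all [pvCloser]
    · simp_all [pvCloser]
  · simp_all [pvCloser]

-- the backward flag over a reversed list equals A's forward lookahead
theorem pvFlag_rev (M : List (Char × Bool)) :
    (M.reverse).foldl (fun g p => pvUpd p.1 g) false = pvCommaLook (M.map Prod.fst) := by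
  induction M with
  | nil => simp [pvCommaLook]
  | cons p M ih =>
      cases p with
      | mk c s =>
        have h1 : ((((c, s) :: M).reverse).foldl (fun g p => pvUpd p.1 g) false)
            = pvUpd c ((M.reverse).foldl (fun g p => pvUpd p.1 g) false) := by
          rw [List.reverse_cons, List.foldl_append]; rfl
        rw [h1, ih]
        show pvUpd c (pvCommaLook (M.map Prod.fst)) = pvCommaLook (c :: M.map Prod.fst)
        by_cases hw : pvWs c = true
        · simp [pvUpd, pvCommaLook, hw, pvWs_not_closer c hw]
        · simp only [Bool.not_eq_true] at hw
          simp only [pvUpd, pvCommaLook, hw, if_false, Bool.false_eq_true]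
          cases h : pvCloser c <;> simp

theorem pvMarkB_fst (l : List Char) (inS : Bool) :
    (pvMarkB l inS).map Prod.fst = l := by
  induction l, inS using pvMarkB.induct with
  | case1 _ => simp [pvMarkB]
  | case2 ch hch c2 r2 ih => rw [pvMarkB.eq_def]; simp [hch, ih]
  | case3 ch hch => rw [pvMarkB.eq_def]; simp [hch, pvMarkB]
  | case4 ch rest hch ih => rw [pvMarkB.eq_def]; simp [hch, ih]
  | case5 ch rest ih => rw [pvMarkB.eq_def]; simp [ih]

theorem pvMain (l : List Char) (inS : Bool) (acc : List Char) :
    pvLoopB ((pvMarkB l inS).reverse) false acc = pvLoopA l inS ++ acc := by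
  induction l, inS using pvMarkB.induct generalizing acc with
  | case1 _ => simp [pvMarkB, pvLoopB, pvLoopA]
  | case2 ch hch c2 r2 ih =>
      have h1 : (pvMarkB (ch :: (c2 :: r2)) true).reverse
          = (pvMarkB r2 true).reverse ++ [(c2, true), (ch, true)] := by
        rw [pvMarkB.eq_def]; simp [hch]
      have hA : pvLoopA (ch :: (c2 :: r2)) true = ch :: c2 :: pvLoopA r2 true := by
        rw [pvLoopA.eq_def]; simp [hch]
      rw [h1, pvLoopB_append, ih, hA]
      simp [pvLoopB]
  | case3 ch hch =>
      have hA : pvLoopA [ch] true = [ch] := by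
        rw [pvLoopA.eq_def]; simp [hch, pvLoopA]
      rw [hA, pvMarkB.eq_def]
      simp [hch, pvMarkB, pvLoopB]
  | case4 ch rest hch ih =>
      have h1 : (pvMarkB (ch :: rest) true).reverse
          = (pvMarkB rest (!(ch == '"'))).reverse ++ [(ch, true)] := by
        rw [pvMarkB.eq_def]; simp [hch]
      have hA : pvLoopA (ch :: rest) true = ch :: pvLoopA rest (!(ch == '"')) := by
        rw [pvLoopA.eq_def]; simp [hch]
      rw [h1, pvLoopB_append, ih, hA]
      simp [pvLoopB]
  | case5 ch rest ih =>
      have hrev : (pvMarkB (ch :: rest) false).reverse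
          = (pvMarkB rest (ch == '"')).reverse ++ [(ch, false)] := by
        rw [pvMarkB.eq_def]; simp
      rw [hrev, pvLoopB_append, ih]
      have hflag : ((pvMarkB rest (ch == '"')).reverse).foldl (fun g p => pvUpd p.1 g) false
          = pvCommaLook rest := by
        rw [pvFlag_rev, pvMarkB_fst]
      by_cases hq : ch = '"'
      · subst hq
        have hA : pvLoopA ('"' :: rest) false = '"' :: pvLoopA rest true := by
          rw [pvLoopA.eq_def]; simp
        rw [hA]; simp [pvLoopB]
      · have hq' : (ch == '"') = false := by simp [hq]
        by_cases hc : ch = ','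
        · subst hc
          cases h : pvCommaLook rest with
          | true =>
              have hA : pvLoopA (',' :: rest) false = pvLoopA rest false := by
                rw [pvLoopA.eq_def]; simp [hq, h]
              simp only [hq'] at hflag ⊢
              rw [hA, hflag, h]; simp [pvLoopB]
          | false =>
              have hA : pvLoopA (',' :: rest) false = ',' :: pvLoopA rest false := by
                rw [pvLoopA.eq_def]; simp [hq, h]
              simp only [hq'] at hflag ⊢
              rw [hA, hflag, h]; simp [pvLoopB]
        · have hc' : (ch == ',') = false := by simp [hc]
          have hA : pvLoopA (ch :: rest) false = ch :: pvLoopA rest false := by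
            rw [pvLoopA.eq_def]; simp [hq, hc]
          rw [hA]; simp [pvLoopB, hflag, hq', hc']

-- ===== VERDICT (by name: the statement is the Claim_ definition above) =====
theorem strip_trailing_commas_py_spec : Claim_equal_strip_trailing_commas_py := by
  intro text _
  unfold Spec_strip_trailing_commas_py strip_trailing_commas_py strip_trailing_commas_py_alt
  rw [pvMain]
  simp
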